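-- pv_equiv track=rewrite | github.com/KingdaKilla/ti-radar | src/ti_radar/domain/research_metrics.py | _compute_citation_trend
-- ===== SOURCE A (Python) =====
-- from typing import Any
--
-- def _compute_citation_trend(papers: list[dict[str, Any]]) -> list[dict[str, Any]]:
--     """Zitationen und Paper-Anzahl pro Jahr."""
--     by_year: dict[int, dict[str, int]] = {}
--     for p in papers:
--         year = p.get("year")
--         if not year:
--             continue
--         if year not in by_year:
--             by_year[year] = {"citations": 0, "paper_count": 0}
--         by_year[year]["citations"] += p.get("citationCount", 0) or 0
--         by_year[year]["paper_count"] += 1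
--
--     return [
--         {"year": y, "citations": d["citations"], "paper_count": d["paper_count"]}
--         for y, d in sorted(by_year.items())
--     ]
-- ===== SOURCE B (Python) =====
-- from itertools import groupby
-- from typing import Any
--
--
-- def _compute_citation_trend(papers: list[dict[str, Any]]) -> list[dict[str, Any]]:
--     """Zitationen und Paper-Anzahl pro Jahr (sort + contiguous groupby)."""
--     with_year = sorted((p for p in papers if p.get("year")), key=lambda p: p["year"])
--     result = []
--     for year, group in groupby(with_year, key=lambda p: p["year"]):
--         g = list(group)
--         result.append({
--             "year": year,
--             "citations": sum((p.get("citationCount", 0) or 0) for p in g),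
--             "paper_count": len(g),
--         })
--     return result
-- ===== Notes on version B (the rewrite author's own statement) =====
-- stated objective: idiomatic
-- what changed: Replaces A's dict-accumulate-then-sort-items strategy by the itertools idiom: filter papers with a truthy year, sort them by year, and aggregate each contiguous group in one groupby pass.
import Mathlib
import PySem

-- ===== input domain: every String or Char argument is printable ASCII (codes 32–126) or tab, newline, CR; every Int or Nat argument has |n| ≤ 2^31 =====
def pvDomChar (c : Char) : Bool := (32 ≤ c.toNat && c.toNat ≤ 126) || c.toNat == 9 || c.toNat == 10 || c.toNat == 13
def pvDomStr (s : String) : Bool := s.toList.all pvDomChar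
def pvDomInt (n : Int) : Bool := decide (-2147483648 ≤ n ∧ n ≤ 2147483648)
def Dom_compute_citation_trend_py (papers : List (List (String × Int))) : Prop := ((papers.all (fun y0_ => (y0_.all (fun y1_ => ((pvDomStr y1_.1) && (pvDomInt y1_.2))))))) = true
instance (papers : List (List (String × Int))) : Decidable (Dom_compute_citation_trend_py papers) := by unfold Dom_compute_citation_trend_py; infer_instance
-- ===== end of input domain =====

-- B replaces A's dict-accumulate-then-sort-items strategy by filter + sort-by-year + one
-- contiguous groupby pass (idiomatic itertools style); return values are proved equal.

-- ===== PORT A =====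
-- One loop iteration of A ('for p in papers: ...').  'if not year' skips both a missing
-- key (None) and year == 0; 'x or 0' on an int value is the identity (0 or 0 == 0), so the
-- citationCount read is ported as getD 0; the by_year[year][...] reads happen only after the
-- key was inserted, so getD is exact there.
def aStep (d : PySem.Dict Int (PySem.Dict String Int)) (p : List (String × Int)) :
    PySem.Dict Int (PySem.Dict String Int) :=
  match (PySem.Dict.mk p).get? "year" with
  | none => d
  | some year =>
    if year = 0 then d
    else
      let d1 := if d.contains year then d
                else d.insert year (PySem.Dict.mk [("citations", 0), ("paper_count", 0)])
      let inner0 := d1.getD year (PySem.Dict.mk [])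
      let inner1 := inner0.insert "citations"
        (inner0.getD "citations" 0 + ((PySem.Dict.mk p).get? "citationCount").getD 0)
      let inner2 := inner1.insert "paper_count" (inner1.getD "paper_count" 0 + 1)
      d1.insert year inner2

-- sorted(by_year.items()) compares int×dict tuples; the keys are distinct, so only the
-- first components are ever compared — key (·.1) is exact.  The final d["citations"] /
-- d["paper_count"] lookups always find their key, so getD is exact.
def compute_citation_trend_py (papers : List (List (String × Int))) : List (List (String × Int)) :=
  let by_year := papers.foldl aStep PySem.Dict.empty
  (PySem.List.sorted by_year.items (fun it => it.1) false).map
    (fun it => [("year", it.1), ("citations", it.2.getD "citations" 0),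
                ("paper_count", it.2.getD "paper_count" 0)])

-- ===== PORT B =====
-- p.get("year") is truthy iff the key is present with a nonzero value, i.e. iff pvYear p ≠ 0
-- (both None and 0 are falsy); after that filter, p["year"] = pvYear p is exact.
def pvYear (p : List (String × Int)) : Int := ((PySem.Dict.mk p).get? "year").getD 0

-- p.get("citationCount", 0) or 0 — 'or 0' is the identity on ints.
def pvCite (p : List (String × Int)) : Int := ((PySem.Dict.mk p).get? "citationCount").getD 0

-- itertools.groupby over a list sorted by year: each group is the head plus the maximal run
-- of following papers with the same year.
def pvGroups : List (List (String × Int)) → List (List (String × Int))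
  | [] => []
  | p :: rest =>
    let g := p :: rest.takeWhile (fun q => pvYear q == pvYear p)
    [("year", pvYear p), ("citations", (g.map pvCite).sum), ("paper_count", (g.length : Int))]
      :: pvGroups (rest.dropWhile (fun q => pvYear q == pvYear p))
termination_by l => l.length
decreasing_by
  simpa using Nat.lt_succ_of_le (List.length_dropWhile_le _ _)

def compute_citation_trend_py_alt (papers : List (List (String × Int))) : List (List (String × Int)) :=
  pvGroups (PySem.List.sorted (papers.filter (fun p => pvYear p != 0)) pvYear false)

-- ===== PRECONDITION & SPEC =====
def Spec_compute_citation_trend_py (papers : List (List (String × Int))) (out : List (List (String × Int))) : Prop := out = compute_citation_trend_py_alt papers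
instance (papers : List (List (String × Int))) (out : List (List (String × Int))) : Decidable (Spec_compute_citation_trend_py papers out) := by unfold Spec_compute_citation_trend_py; infer_instance

-- ===== CLAIM (what is proved, stated in full; the proofs are below) =====
def Claim_equal_compute_citation_trend_py : Prop := ∀ (papers : List (List (String × Int))), Dom_compute_citation_trend_py papers → Spec_compute_citation_trend_py papers (compute_citation_trend_py papers)

-- ===== LEMMAS AND PROOFS =====

-- Canonical description both sides are reduced to.
def keptOf (papers : List (List (String × Int))) : List (List (String × Int)) :=
  papers.filter (fun p => pvYear p != 0)

def grpOf (K : List (List (String × Int))) (y : Int) : List (List (String × Int)) :=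
  K.filter (fun p => pvYear p == y)

def entryOf (K : List (List (String × Int))) (y : Int) : List (String × Int) :=
  [("year", y), ("citations", ((grpOf K y).map pvCite).sum),
   ("paper_count", ((grpOf K y).length : Int))]

def innerOf (K : List (List (String × Int))) (y : Int) : PySem.Dict String Int :=
  PySem.Dict.mk [("citations", ((grpOf K y).map pvCite).sum),
                 ("paper_count", ((grpOf K y).length : Int))]

def yearsOf (K : List (List (String × Int))) : List Int := PySem.Set.ofList (K.map pvYear)

-- small facts ---------------------------------------------------------------

lemma grpOf_append_singleton_ne (K : List (List (String × Int))) (p : List (String × Int))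
    (y : Int) (h : pvYear p ≠ y) : grpOf (K ++ [p]) y = grpOf K y := by
  simp [grpOf, List.filter_append, h]

lemma grpOf_append_singleton_eq (K : List (List (String × Int))) (p : List (String × Int))
    (y : Int) (h : pvYear p = y) : grpOf (K ++ [p]) y = grpOf K y ++ [p] := by
  simp [grpOf, List.filter_append, h]

lemma innerOf_append_ne (K : List (List (String × Int))) (p : List (String × Int))
    (y : Int) (h : pvYear p ≠ y) : innerOf (K ++ [p]) y = innerOf K y := by
  simp only [innerOf, grpOf_append_singleton_ne K p y h]

lemma innerOf_append_eq (K : List (List (String × Int))) (p : List (String × Int)) :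
    innerOf (K ++ [p]) (pvYear p)
      = PySem.Dict.mk [("citations", ((grpOf K (pvYear p)).map pvCite).sum + pvCite p),
                       ("paper_count", ((grpOf K (pvYear p)).length : Int) + 1)] := by
  simp only [innerOf, grpOf_append_singleton_eq K p (pvYear p) rfl, List.map_append,
    List.sum_append, List.length_append, List.map_cons, List.map_nil, List.sum_cons,
    List.sum_nil, List.length_cons, List.length_nil]
  push_cast
  ring_nf

lemma innerOf_getD_citations (K : List (List (String × Int))) (y : Int) :
    (innerOf K y).getD "citations" 0 = ((grpOf K y).map pvCite).sum := by
  simp [innerOf, PySem.Dict.getD, PySem.Dict.get?]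

lemma innerOf_getD_paper_count (K : List (List (String × Int))) (y : Int) :
    (innerOf K y).getD "paper_count" 0 = ((grpOf K y).length : Int) := by
  simp [innerOf, PySem.Dict.getD, PySem.Dict.get?]

lemma foldl_add_all_mem {α : Type} [BEq α] [LawfulBEq α] (s : PySem.Set α) (l : List α)
    (h : ∀ a ∈ l, a ∈ s) : l.foldl PySem.Set.add s = s := by
  induction l with
  | nil => rfl
  | cons a l ih =>
    simp only [List.foldl_cons, PySem.Set.add_of_mem (h a (by simp))]
    exact ih (fun b hb => h b (by simp [hb]))

lemma sublist_ofList {α : Type} [BEq α] [LawfulBEq α] (l : List α) :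
    (PySem.Set.ofList l).Sublist l := by
  induction l with
  | nil => simp [PySem.Set.ofList_nil]
  | cons a l ih =>
    rw [PySem.Set.ofList_cons]
    exact List.Sublist.cons₂ a
      (List.Sublist.trans (by simp only [PySem.Set.discard]; exact List.filter_sublist) ih)

lemma dropWhile_head_false {α : Type} (p : α → Bool) :
    ∀ (l : List α) {a : α} {t : List α}, l.dropWhile p = a :: t → p a = false := by
  intro l
  induction l with
  | nil => intro a t h; simp at h
  | cons b l ih =>
    intro a t h
    by_cases hb : p b
    · rw [List.dropWhile_cons_of_pos hb] at h; exact ih h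
    · rw [List.dropWhile_cons_of_neg hb] at h
      cases h
      simpa using hb

-- ===== A side ===============================================================

lemma aStep_skip (d : PySem.Dict Int (PySem.Dict String Int)) (p : List (String × Int))
    (hy : pvYear p = 0) : aStep d p = d := by
  cases hg : (PySem.Dict.mk p).get? "year" with
  | none => simp [aStep, hg]
  | some y =>
    have : y = 0 := by simpa [pvYear, hg] using hy
    simp [aStep, hg, this]

lemma get?_year_of_ne (p : List (String × Int)) (hy : pvYear p ≠ 0) :
    (PySem.Dict.mk p).get? "year" = some (pvYear p) := by
  cases hg : (PySem.Dict.mk p).get? "year" with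
  | none => exact absurd (by simp [pvYear, hg]) hy
  | some y => simp [pvYear, hg]

lemma inner_update (s n c : Int) :
    (((PySem.Dict.mk [("citations", s), ("paper_count", n)]).insert "citations"
        ((PySem.Dict.mk [("citations", s), ("paper_count", n)]).getD "citations" 0 + c)).insert
      "paper_count"
      (((PySem.Dict.mk [("citations", s), ("paper_count", n)]).insert "citations"
          ((PySem.Dict.mk [("citations", s), ("paper_count", n)]).getD "citations" 0 + c)).getD
        "paper_count" 0 + 1))
      = PySem.Dict.mk [("citations", s + c), ("paper_count", n + 1)] := by
  rfl

-- A's accumulation loop, characterised: after the fold, the dict maps each distinct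
-- (nonzero) year, in first-occurrence order, to its inner {citations, paper_count} dict.
lemma A_items (papers : List (List (String × Int))) :
    papers.foldl aStep PySem.Dict.empty
      = PySem.Dict.mk ((yearsOf (keptOf papers)).map
          (fun y => (y, innerOf (keptOf papers) y))) := by
  induction papers using List.reverseRecOn with
  | nil => rfl
  | append_singleton L p ih =>
    rw [List.foldl_append, List.foldl_cons, List.foldl_nil, ih]
    by_cases hy : pvYear p = 0
    · have hkept : keptOf (L ++ [p]) = keptOf L := by
        simp [keptOf, List.filter_append, hy]
      rw [hkept, aStep_skip _ _ hy]
    · have hkept : keptOf (L ++ [p]) = keptOf L ++ [p] := by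
        simp [keptOf, List.filter_append, hy]
      rw [hkept]
      set K := keptOf L with hK
      set S := yearsOf K with hS
      set d := PySem.Dict.mk (S.map fun y => (y, innerOf K y)) with hd
      have hkeysd : d.keys = S := by
        simp [hd, PySem.Dict.keys, Function.comp_def]
      have hnd : d.keys.Nodup := by rw [hkeysd]; exact PySem.Set.nodup_ofList _
      have hcont : d.contains (pvYear p) = decide (pvYear p ∈ S) := by
        rw [PySem.Dict.contains_eq_decide_mem_keys, hkeysd]
      have hyears : yearsOf (K ++ [p]) = PySem.Set.add S (pvYear p) := by
        simp only [yearsOf, List.map_append, List.map_cons, List.map_nil,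
          PySem.Set.ofList_append_singleton, hS]
      simp only [aStep, get?_year_of_ne p hy, if_neg hy]
      by_cases hmem : pvYear p ∈ S
      · rw [hcont, if_pos (by simpa using hmem)]
        have hin : d.getD (pvYear p) (PySem.Dict.mk []) = innerOf K (pvYear p) := by
          refine PySem.Dict.getD_of_mem_items d ?_ hnd _
          exact List.mem_map_of_mem hmem
        rw [hin]
        have hIN : innerOf K (pvYear p)
            = PySem.Dict.mk [("citations", ((grpOf K (pvYear p)).map pvCite).sum),
                             ("paper_count", ((grpOf K (pvYear p)).length : Int))] := rfl
        rw [hIN, inner_update]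
        apply PySem.Dict.ext
        rw [PySem.Dict.items_insert_of_contains d _ (by rw [hcont]; simpa using hmem)]
        have hrhs : (PySem.Dict.mk ((yearsOf (K ++ [p])).map
            (fun y => (y, innerOf (K ++ [p]) y)))).items
            = S.map (fun y => (y, innerOf (K ++ [p]) y)) := by
          rw [hyears, PySem.Set.add_of_mem hmem]
        rw [hrhs]
        show (S.map (fun y => (y, innerOf K y))).map _ = _
        rw [List.map_map]
        apply List.map_congr_left
        intro y hyS
        by_cases hyy : y = pvYear p
        · simp only [Function.comp_def]
          rw [if_pos (by simp [hyy]), hyy, innerOf_append_eq]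
          rfl
        · simp only [Function.comp_def]
          rw [if_neg (by simpa using hyy), innerOf_append_ne K p y (fun h => hyy h.symm)]
      · rw [hcont, if_neg (by simpa using hmem)]
        have hc0 : d.contains (pvYear p) = false := by rw [hcont]; simpa using hmem
        have hin : (d.insert (pvYear p)
              (PySem.Dict.mk [("citations", 0), ("paper_count", 0)])).getD (pvYear p)
              (PySem.Dict.mk []) = PySem.Dict.mk [("citations", 0), ("paper_count", 0)] := by
          rw [PySem.Dict.getD_eq_get?_getD, PySem.Dict.get?_insert_self]
          rfl
        rw [hin, inner_update]
        apply PySem.Dict.ext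
        rw [PySem.Dict.items_insert_of_contains _ _ (PySem.Dict.contains_insert_self _ _ _)]
        rw [PySem.Dict.items_insert_of_not_contains d _ hc0]
        have hgK : grpOf K (pvYear p) = [] := by
          rw [grpOf, List.filter_eq_nil_iff]
          intro q hq
          simp only [beq_iff_eq]
          intro hqy
          apply hmem
          rw [hS, yearsOf, PySem.Set.mem_ofList]
          exact hqy ▸ List.mem_map_of_mem hq
        have hrhs : (PySem.Dict.mk ((yearsOf (K ++ [p])).map
            (fun y => (y, innerOf (K ++ [p]) y)))).items
            = S.map (fun y => (y, innerOf (K ++ [p]) y))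
              ++ [(pvYear p, innerOf (K ++ [p]) (pvYear p))] := by
          rw [hyears, PySem.Set.add_of_not_mem hmem]
          simp
        rw [hrhs]
        have hlhs : d.items = S.map (fun y => (y, innerOf K y)) := rfl
        rw [hlhs, List.map_append]
        congr 1
        · rw [List.map_map]
          apply List.map_congr_left
          intro y hyS
          have hyy : pvYear p ≠ y := fun h => hmem (h ▸ hyS)
          simp only [Function.comp_def]
          rw [if_neg (by simpa using fun h => hyy h.symm), innerOf_append_ne K p y hyy]
        · simp only [List.map_cons, List.map_nil]
          rw [if_pos (by simp), innerOf_append_eq, hgK]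
          simp [pvCite]

lemma A_result (papers : List (List (String × Int))) :
    compute_citation_trend_py papers
      = (PySem.List.sorted (yearsOf (keptOf papers)) (fun y => y) false).map
          (entryOf (keptOf papers)) := by
  simp only [compute_citation_trend_py]
  rw [A_items]
  set K := keptOf papers with hK
  have hitems : (PySem.Dict.mk ((yearsOf K).map (fun y => (y, innerOf K y)))).items
      = (yearsOf K).map (fun y => (y, innerOf K y)) := rfl
  rw [hitems]
  have hsort : PySem.List.sorted ((yearsOf K).map (fun y => (y, innerOf K y)))
      (fun it => it.1) false
      = (PySem.List.sorted (yearsOf K) (fun y => y) false).map (fun y => (y, innerOf K y)) := by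
    apply PySem.List.sorted_eq_of_perm_of_pairwise_lt
    · exact (PySem.List.sorted_perm _ _ _).map _
    · rw [List.pairwise_map]
      exact PySem.List.sorted_ofList_pairwise_lt (K.map pvYear)
  rw [hsort, List.map_map]
  apply List.map_congr_left
  intro y _
  simp [entryOf, innerOf_getD_citations, innerOf_getD_paper_count]

-- ===== B side ===============================================================

-- the groupby pass on a year-sorted list, characterised
lemma B_groups : ∀ (xs : List (List (String × Int))),
    xs.Pairwise (fun a b => pvYear a ≤ pvYear b) →
    pvGroups xs = (PySem.Set.ofList (xs.map pvYear)).map (entryOf xs) := by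
  intro xs
  induction xs using pvGroups.induct with
  | case1 => intro _; simp [pvGroups]
  | case2 p rest ih =>
    intro h
    obtain ⟨hp, hrest⟩ := List.pairwise_cons.mp h
    set y := pvYear p with hy
    set same := rest.takeWhile (fun q => pvYear q == y) with hsame
    set rest' := rest.dropWhile (fun q => pvYear q == y) with hrest'
    have hsplit : same ++ rest' = rest := List.takeWhile_append_dropWhile
    have hsame_y : ∀ q ∈ same, pvYear q = y := by
      intro q hq
      simpa using List.mem_takeWhile_imp hq
    have hpair' : rest'.Pairwise (fun a b => pvYear a ≤ pvYear b) :=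
      List.Pairwise.sublist (List.dropWhile_sublist _) hrest
    have hrest'_gt : ∀ q ∈ rest', y < pvYear q := by
      cases hr : rest' with
      | nil => intro q hq; simp at hq
      | cons h0 t =>
        have hsub : (h0 :: t).Sublist rest := by
          rw [← hr, hrest']; exact List.dropWhile_sublist _
        have hh0mem : h0 ∈ rest := List.Sublist.mem (by simp) hsub
        have hh0ne : pvYear h0 ≠ y := by
          have := dropWhile_head_false (fun q => pvYear q == y) rest
            (by rw [← hrest']; exact hr)
          simpa using this
        have hh0 : y < pvYear h0 := lt_of_le_of_ne (hp h0 hh0mem) (Ne.symm hh0ne)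
        rw [hr] at hpair'
        intro q hq
        rcases List.mem_cons.mp hq with rfl | hq
        · exact hh0
        · have hp' : pvYear h0 ≤ pvYear q :=
            (List.pairwise_cons.mp hpair').1 q hq
          exact lt_of_lt_of_le hh0 hp'
    have hrest'_ne : ∀ q ∈ rest', pvYear q ≠ y := fun q hq => ne_of_gt (hrest'_gt q hq)
    have hynotin : ∀ y' ∈ PySem.Set.ofList (rest'.map pvYear), y' ≠ y := by
      intro y' hy'
      rcases List.mem_map.mp ((PySem.Set.mem_ofList _ _).mp hy') with ⟨q, hq, rfl⟩
      exact hrest'_ne q hq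
    have hkeys : PySem.Set.ofList ((p :: rest).map pvYear)
        = y :: PySem.Set.ofList (rest'.map pvYear) := by
      rw [← hsplit]
      have h1 : (p :: (same ++ rest')).map pvYear
          = y :: (same.map pvYear ++ rest'.map pvYear) := by
        rw [List.map_cons, List.map_append, ← hy]
      rw [h1]
      have hfold : PySem.Set.ofList (y :: (same.map pvYear ++ rest'.map pvYear))
          = PySem.Set.ofList (y :: rest'.map pvYear) := by
        show (y :: (same.map pvYear ++ rest'.map pvYear)).foldl PySem.Set.add PySem.Set.empty
          = (y :: rest'.map pvYear).foldl PySem.Set.add PySem.Set.empty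
        rw [List.foldl_cons, List.foldl_cons, List.foldl_append]
        congr 1
        apply foldl_add_all_mem
        intro a ha
        rcases List.mem_map.mp ha with ⟨q, hq, rfl⟩
        rw [hsame_y q hq]
        exact (PySem.Set.mem_add _ _ _).mpr (Or.inr rfl)
      rw [hfold, PySem.Set.ofList_cons]
      congr 1
      show List.filter _ _ = _
      apply List.filter_eq_self.mpr
      intro a ha
      simpa using hynotin a ha
    have hgrp_y : grpOf (p :: rest) y = p :: same := by
      rw [← hsplit]
      show List.filter _ (p :: (same ++ rest')) = _
      rw [List.filter_cons_of_pos (by simp [← hy]), List.filter_append]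
      rw [List.filter_eq_self.mpr (by intro q hq; simpa using hsame_y q hq)]
      rw [List.filter_eq_nil_iff.mpr (by intro q hq; simpa using hrest'_ne q hq)]
      simp
    have hgrp_ne : ∀ y', y' ≠ y → grpOf (p :: rest) y' = grpOf rest' y' := by
      intro y' hne
      rw [← hsplit]
      show List.filter _ (p :: (same ++ rest')) = _
      rw [List.filter_cons_of_neg (by simp [← hy]; exact fun h => hne h.symm),
        List.filter_append]
      rw [List.filter_eq_nil_iff.mpr (by
        intro q hq
        simp only [beq_iff_eq]
        rw [hsame_y q hq]
        exact fun h => hne h.symm)]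
      simp [grpOf]
    have hstep : pvGroups (p :: rest)
        = [("year", y), ("citations", ((p :: same).map pvCite).sum),
           ("paper_count", ((p :: same).length : Int))] :: pvGroups rest' := by
      rw [pvGroups]
    rw [hstep, hkeys, List.map_cons, ih hpair']
    refine congrArg₂ List.cons ?_ ?_
    · rw [entryOf, hgrp_y]
      simp
    · apply List.map_congr_left
      intro y' hy'
      rw [entryOf, entryOf, hgrp_ne y' (hynotin y' hy')]

lemma B_result (papers : List (List (String × Int))) :
    compute_citation_trend_py_alt papers
      = (PySem.List.sorted (yearsOf (keptOf papers)) (fun y => y) false).map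
          (entryOf (keptOf papers)) := by
  show pvGroups (PySem.List.sorted (keptOf papers) pvYear false) = _
  set K := keptOf papers with hK
  set T := PySem.List.sorted K pvYear false with hT
  have hTK : T.Perm K := PySem.List.sorted_perm _ _ _
  rw [B_groups T (PySem.List.sorted_pairwise K pvYear)]
  have hkeys2 : PySem.List.sorted (yearsOf K) (fun y => y) false
      = PySem.Set.ofList (T.map pvYear) := by
    apply PySem.List.sorted_eq_of_perm_of_pairwise_lt
    · apply (List.perm_ext_iff_of_nodup (PySem.Set.nodup_ofList _)
        (PySem.Set.nodup_ofList _)).mpr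
      intro a
      rw [PySem.Set.mem_ofList, PySem.Set.mem_ofList]
      exact (hTK.map pvYear).mem_iff
    · have hle : (T.map pvYear).Pairwise (· ≤ ·) :=
        List.pairwise_map.mpr (PySem.List.sorted_pairwise K pvYear)
      have hsub := List.Pairwise.sublist (sublist_ofList (T.map pvYear)) hle
      have hnd : (PySem.Set.ofList (T.map pvYear)).Pairwise (· ≠ ·) :=
        PySem.Set.nodup_ofList _
      exact (hsub.and hnd).imp (fun h => lt_of_le_of_ne h.1 h.2)
  rw [hkeys2]
  apply List.map_congr_left
  intro y _
  have hgrp : (grpOf T y).Perm (grpOf K y) := hTK.filter _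
  rw [entryOf, entryOf, (hgrp.map pvCite).sum_eq, hgrp.length_eq]

-- ===== VERDICT (by name: the statement is the Claim_ definition above) =====
theorem compute_citation_trend_py_spec : Claim_equal_compute_citation_trend_py := by
  intro papers _
  show compute_citation_trend_py papers = compute_citation_trend_py_alt papers
  rw [A_result, B_result]
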